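-- pv_equiv track=rewrite | github.com/T567U1/LeetCode | to be named/Perform String Shifts.py | stringShift
-- ===== SOURCE A (Python) =====
-- from typing import List
--
-- def stringShift(s: str, shift: List[List[int]]) -> str:
--     for shif in shift:
--         if shif[0]:
--             while shif[1] != 0:
--                 s = s[-1] + ''.join(list(s)[:-1])
--                 shif[1] -=1
--
--         else:
--             while shif[1] != 0:
--                 s = ''.join(list(s)[1:]) + s[0]
--                 shif[1] -=1
--     return s
-- ===== SOURCE B (Python) =====
-- from typing import List
--
-- def stringShift(s: str, shift: List[List[int]]) -> str:
--     n = len(s)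
--     if n == 0:
--         return s
--     total = sum(shif[1] if shif[0] else -shif[1] for shif in shift)
--     r = total % n
--     return s[n - r:] + s[:n - r]
-- ===== Notes on version B (the rewrite author's own statement) =====
-- stated objective: faster
-- what changed: Replaces the per-unit rotation loops (one character moved per iteration of each while loop) by summing the net signed shift amount once, reducing it modulo len(s), and applying a single two-slice rotation; intended as an asymptotic speed-up (a timing run could not measure a ratio: A timed out at n=16 where B returned).
-- outside the precondition, e.g. on stringShift('abc', [[0, -1]]): A does not finish within the time limit, B returns 'cab'; on stringShift('', [[1, 2]]): A raises IndexError, B returns ''; on stringShift('ab', [[1]]): A raises IndexError, B raises IndexError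
import Mathlib
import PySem

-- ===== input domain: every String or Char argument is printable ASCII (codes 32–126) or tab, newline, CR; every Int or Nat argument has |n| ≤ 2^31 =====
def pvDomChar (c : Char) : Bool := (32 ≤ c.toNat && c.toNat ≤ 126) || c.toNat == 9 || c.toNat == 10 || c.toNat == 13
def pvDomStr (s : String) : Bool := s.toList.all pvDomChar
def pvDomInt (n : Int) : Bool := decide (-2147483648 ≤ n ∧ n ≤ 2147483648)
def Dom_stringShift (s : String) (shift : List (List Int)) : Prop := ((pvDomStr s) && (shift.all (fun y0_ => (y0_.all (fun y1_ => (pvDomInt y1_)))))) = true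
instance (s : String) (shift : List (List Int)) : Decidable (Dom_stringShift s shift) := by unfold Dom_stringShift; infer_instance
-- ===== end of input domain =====

-- B replaces A's one-character-at-a-time rotation loops by one net-shift sum mod n and a single
-- two-slice rotation (intended as faster; a timing run measured no ratio: A timed out at n=16 where B returned). A mutates the inner lists of `shift` in place
-- (decrements the amounts to 0); the equivalence proved here is about the RETURN value only.

-- ===== PORT A =====
-- one right-rotation step: s = s[-1] + ''.join(list(s)[:-1]); pyGet? is none exactly where Python raises (empty s, excluded by Pre_)
def pvStepR (cs : List Char) : List Char :=
  match PySem.List.pyGet? cs (-1) with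
  | none => cs
  | some c => [c] ++ PySem.Chars.join [] (PySem.List.slice (cs.map (fun d => [d])) none (some (-1)))

-- one left-rotation step: s = ''.join(list(s)[1:]) + s[0]
def pvStepL (cs : List Char) : List Char :=
  match PySem.List.pyGet? cs 0 with
  | none => cs
  | some c => PySem.Chars.join [] (PySem.List.slice (cs.map (fun d => [d])) (some 1) none) ++ [c]

-- while shif[1] != 0: … ; shif[1] -= 1  (runs shif[1] times; Python diverges for negative shif[1], excluded by Pre_)
def pvLoopR (cs : List Char) (k : Int) : List Char :=
  if h : 0 < k then pvLoopR (pvStepR cs) (k - 1) else cs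
termination_by k.toNat
decreasing_by omega

def pvLoopL (cs : List Char) (k : Int) : List Char :=
  if h : 0 < k then pvLoopL (pvStepL cs) (k - 1) else cs
termination_by k.toNat
decreasing_by omega

def stringShift (s : String) (shift : List (List Int)) : String :=
  String.ofList <| shift.foldl (fun cs shif =>
    if (PySem.List.pyGet? shif 0).getD 0 ≠ 0 then
      pvLoopR cs ((PySem.List.pyGet? shif 1).getD 0)
    else
      pvLoopL cs ((PySem.List.pyGet? shif 1).getD 0)) s.toList

-- ===== PORT B =====
def stringShift_alt (s : String) (shift : List (List Int)) : String :=
  let n : Int := s.toList.length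
  if n = 0 then s
  else
    let total : Int := (shift.map (fun shif =>
      if (PySem.List.pyGet? shif 0).getD 0 ≠ 0 then (PySem.List.pyGet? shif 1).getD 0
      else -((PySem.List.pyGet? shif 1).getD 0))).sum
    let r := PySem.Int.mod total n
    String.ofList (PySem.List.slice s.toList (some (n - r)) none ++
                   PySem.List.slice s.toList none (some (n - r)))

-- ===== PRECONDITION & SPEC =====
-- Pre_ excludes exactly the inputs where A does not return normally: an inner list shorter than 2
-- (IndexError on shif[0]/shif[1]), an empty s with some inner list short or of nonzero amount
-- (IndexError on s[-1]/s[0]), and a negative amount with nonempty s (the while loop diverges).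
def Pre_stringShift (s : String) (shift : List (List Int)) : Prop :=
  (∀ l ∈ shift, 2 ≤ l.length ∧ 0 ≤ l.getD 1 0) ∧
  (s.toList ≠ [] ∨ ∀ l ∈ shift, l.getD 1 0 = 0)
instance (s : String) (shift : List (List Int)) : Decidable (Pre_stringShift s shift) := by unfold Pre_stringShift; infer_instance

def pvWitness_stringShift : String × List (List Int) := ("ab", [[1, 1], [0, 3]])

def Spec_stringShift (s : String) (shift : List (List Int)) (out : String) : Prop := out = stringShift_alt s shift
instance (s : String) (shift : List (List Int)) (out : String) : Decidable (Spec_stringShift s shift out) := by unfold Spec_stringShift; infer_instance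

-- ===== CLAIM (what is proved, stated in full; the proofs are below) =====
def Claim_equal_stringShift : Prop := ∀ (s : String) (shift : List (List Int)), Dom_stringShift s shift → Pre_stringShift s shift → Spec_stringShift s shift (stringShift s shift)

-- ===== LEMMAS AND PROOFS =====

theorem pvStepR_eq {cs : List Char} (h : cs ≠ []) :
    pvStepR cs = cs.rotate (cs.length - 1) := by
  unfold pvStepR
  rw [PySem.List.pyGet?_neg_one, List.getLast?_eq_some_getLast h]
  simp only [PySem.List.slice_to_neg_one, ← List.map_dropLast, PySem.Chars.join_nil_singletons]
  rw [List.rotate_eq_drop_append_take (by omega)]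
  rw [List.drop_length_sub_one h, List.dropLast_eq_take]

theorem pvStepL_eq {cs : List Char} (h : cs ≠ []) :
    pvStepL cs = cs.rotate 1 := by
  obtain ⟨a, t, rfl⟩ := List.exists_cons_of_ne_nil h
  unfold pvStepL
  rw [PySem.List.pyGet?_zero_cons]
  simp only [PySem.List.slice_from_one]
  simp [List.rotate_cons_succ]

theorem pvLoopR_eq (m : Nat) (cs : List Char) (h : cs ≠ []) :
    pvLoopR cs (m : Int) = cs.rotate (m * (cs.length - 1)) := by
  induction m generalizing cs with
  | zero => rw [pvLoopR]; simp
  | succ p ih =>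
    rw [pvLoopR]
    have h1 : (0:Int) < ((p+1 : Nat) : Int) := by positivity
    rw [dif_pos h1]
    have h2 : ((p+1 : Nat) : Int) - 1 = (p : Int) := by push_cast; ring
    rw [h2, pvStepR_eq h, ih _ (by simp [h])]
    simp only [List.length_rotate, List.rotate_rotate]
    ring_nf

theorem pvLoopL_eq (m : Nat) (cs : List Char) (h : cs ≠ []) :
    pvLoopL cs (m : Int) = cs.rotate m := by
  induction m generalizing cs with
  | zero => rw [pvLoopL]; simp
  | succ p ih =>
    rw [pvLoopL]
    have h1 : (0:Int) < ((p+1 : Nat) : Int) := by positivity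
    rw [dif_pos h1]
    have h2 : ((p+1 : Nat) : Int) - 1 = (p : Int) := by push_cast; ring
    rw [h2, pvStepL_eq h, ih _ (by simp [h])]
    simp only [List.rotate_rotate]
    ring_nf

-- shif[1] read through pyGet?, as the ports do, equals List.getD, as Pre_ states it
theorem pvGetD_one (l : List Int) : (PySem.List.pyGet? l 1).getD 0 = l.getD 1 0 := by
  simp only [zero_le_one, PySem.List.pyGet?_of_nonneg, Int.toNat_one, List.getD_eq_getElem?_getD]

-- the total LEFT-rotation amount A applies to the string (a right step is a left rotation by n-1)
def pvTally (n : Nat) (shift : List (List Int)) : Nat :=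
  (shift.map (fun l =>
    if (PySem.List.pyGet? l 0).getD 0 ≠ 0 then ((PySem.List.pyGet? l 1).getD 0).toNat * (n - 1)
    else ((PySem.List.pyGet? l 1).getD 0).toNat)).sum

theorem pvFold_eq (shift : List (List Int)) (cs : List Char) (h : cs ≠ [])
    (hp : ∀ l ∈ shift, 2 ≤ l.length ∧ 0 ≤ l.getD 1 0) :
    shift.foldl (fun cs shif =>
      if (PySem.List.pyGet? shif 0).getD 0 ≠ 0 then
        pvLoopR cs ((PySem.List.pyGet? shif 1).getD 0)
      else
        pvLoopL cs ((PySem.List.pyGet? shif 1).getD 0)) cs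
    = cs.rotate (pvTally cs.length shift) := by
  induction shift generalizing cs with
  | nil => simp [pvTally]
  | cons l rest ih =>
    obtain ⟨hlen, hpos⟩ := hp l (List.mem_cons_self ..)
    have hnn : 0 ≤ (PySem.List.pyGet? l 1).getD 0 := pvGetD_one l ▸ hpos
    obtain ⟨m, ham⟩ := Int.eq_ofNat_of_zero_le hnn
    rw [List.foldl_cons]
    have hstep : (if (PySem.List.pyGet? l 0).getD 0 ≠ 0 then
        pvLoopR cs ((PySem.List.pyGet? l 1).getD 0)
      else
        pvLoopL cs ((PySem.List.pyGet? l 1).getD 0))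
      = cs.rotate (if (PySem.List.pyGet? l 0).getD 0 ≠ 0 then ((PySem.List.pyGet? l 1).getD 0).toNat * (cs.length - 1) else ((PySem.List.pyGet? l 1).getD 0).toNat) := by
      split_ifs with hd
      · rw [ham]; simp only [Int.toNat_natCast]; exact pvLoopR_eq _ _ h
      · rw [ham]; simp only [Int.toNat_natCast]; exact pvLoopL_eq _ _ h
    rw [hstep, ih _ (by simp [h]) (fun l hl => hp l (List.mem_cons_of_mem _ hl))]
    simp only [List.length_rotate, List.rotate_rotate, pvTally, List.map_cons, List.sum_cons]

-- A's left-rotation tally is congruent to minus B's net signed total, modulo n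
theorem pvTally_modEq (n : Nat) (hn : 0 < n) (shift : List (List Int))
    (hp : ∀ l ∈ shift, 2 ≤ l.length ∧ 0 ≤ l.getD 1 0) :
    ((pvTally n shift : Int)) ≡ -((shift.map (fun shif =>
      if (PySem.List.pyGet? shif 0).getD 0 ≠ 0 then (PySem.List.pyGet? shif 1).getD 0
      else -((PySem.List.pyGet? shif 1).getD 0))).sum) [ZMOD (n : Int)] := by
  induction shift with
  | nil => simp [pvTally]
  | cons l rest ih =>
    obtain ⟨hlen, hpos⟩ := hp l (List.mem_cons_self ..)
    have hnn : 0 ≤ (PySem.List.pyGet? l 1).getD 0 := pvGetD_one l ▸ hpos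
    have ih' := ih (fun l hl => hp l (List.mem_cons_of_mem _ hl))
    unfold pvTally at ih' ⊢
    simp only [List.map_cons, List.sum_cons, Nat.cast_add, neg_add]
    refine Int.ModEq.add ?_ ih'
    set a : Int := (PySem.List.pyGet? l 1).getD 0 with ha
    have hta : (a.toNat : Int) = a := by omega
    have h1 : ((n:Int) - 1) ≡ -1 [ZMOD (n:Int)] := by
      simpa using Int.ModEq.sub_right 1 (Int.modEq_zero_iff_dvd.mpr dvd_rfl)
    split_ifs with hd
    · calc ((a.toNat * (n - 1) : Nat) : Int) = a * ((n:Int) - 1) := by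
            rw [Nat.cast_mul, Nat.cast_sub (by omega), hta]; push_cast; ring
        _ ≡ a * (-1) [ZMOD (n:Int)] := Int.ModEq.mul_left a h1
        _ = -a := by ring
    · rw [hta]; simp

-- with every amount 0 both while loops run zero times and A's fold is the identity
theorem pvFold_zero (shift : List (List Int)) (cs : List Char)
    (hz : ∀ l ∈ shift, l.getD 1 0 = 0) :
    shift.foldl (fun cs shif =>
      if (PySem.List.pyGet? shif 0).getD 0 ≠ 0 then
        pvLoopR cs ((PySem.List.pyGet? shif 1).getD 0)
      else
        pvLoopL cs ((PySem.List.pyGet? shif 1).getD 0)) cs = cs := by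
  induction shift generalizing cs with
  | nil => rfl
  | cons l rest ih =>
    have h0 : (PySem.List.pyGet? l 1).getD 0 = 0 := by
      rw [pvGetD_one]; exact hz l (List.mem_cons_self ..)
    rw [List.foldl_cons]
    have hR : pvLoopR cs 0 = cs := by rw [pvLoopR]; norm_num
    have hL : pvLoopL cs 0 = cs := by rw [pvLoopL]; norm_num
    rw [show (if (PySem.List.pyGet? l 0).getD 0 ≠ 0 then
        pvLoopR cs ((PySem.List.pyGet? l 1).getD 0)
      else pvLoopL cs ((PySem.List.pyGet? l 1).getD 0)) = cs by
        rw [h0]; split_ifs <;> [exact hR; exact hL]]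
    exact ih cs (fun l hl => hz l (List.mem_cons_of_mem _ hl))

theorem pvMain (s : String) (shift : List (List Int))
    (hp : (∀ l ∈ shift, 2 ≤ l.length ∧ 0 ≤ l.getD 1 0) ∧
          (s.toList ≠ [] ∨ ∀ l ∈ shift, l.getD 1 0 = 0)) :
    stringShift s shift = stringShift_alt s shift := by
  obtain ⟨h1, h2⟩ := hp
  by_cases hcs : s.toList = []
  · have hz : ∀ l ∈ shift, l.getD 1 0 = 0 := h2.resolve_left (by simp [hcs])
    rw [stringShift, pvFold_zero shift _ hz, String.ofList_toList]
    rw [stringShift_alt]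
    simp [hcs]
  · set cs := s.toList with hdef
    have hN : 0 < cs.length := List.length_pos_iff.mpr hcs
    set N := cs.length with hNdef
    set total : Int := (shift.map (fun shif =>
      if (PySem.List.pyGet? shif 0).getD 0 ≠ 0 then (PySem.List.pyGet? shif 1).getD 0
      else -((PySem.List.pyGet? shif 1).getD 0))).sum with htot
    set r := PySem.Int.mod total (N : Int) with hr
    have hremod : r = total % (N : Int) := PySem.Int.mod_eq_emod_of_pos (by exact_mod_cast hN)
    have hr0 : 0 ≤ r := PySem.Int.mod_nonneg _ (by exact_mod_cast hN)
    have hrN : r < (N : Int) := PySem.Int.mod_lt _ (by exact_mod_cast hN)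
    have hB : stringShift_alt s shift =
        String.ofList (cs.drop ((N : Int) - r).toNat ++ cs.take ((N : Int) - r).toNat) := by
      rw [stringShift_alt]
      simp only [← hdef, ← hNdef, ← htot, ← hr]
      rw [if_neg (by exact_mod_cast hN.ne')]
      rw [PySem.List.slice_from cs (by omega : (0:Int) ≤ (N : Int) - r),
          PySem.List.slice_to cs (by omega : (0:Int) ≤ (N : Int) - r)]
    have hA : stringShift s shift = String.ofList (cs.rotate (pvTally N shift)) := by
      rw [stringShift, pvFold_eq shift cs hcs h1]
    rw [hA, hB]
    congr 1
    set k := ((N : Int) - r).toNat with hk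
    have hkN : k ≤ N := by omega
    have hmod : (pvTally N shift : Int) ≡ (k : Int) [ZMOD (N : Int)] := by
      have e1 := pvTally_modEq N hN shift h1
      have e2 : total ≡ r [ZMOD (N : Int)] := by
        unfold Int.ModEq
        rw [hremod]
        simp [Int.emod_emod_of_dvd]
      have e3 : -total ≡ -r [ZMOD (N : Int)] := Int.ModEq.neg e2
      have e4 : -r ≡ (N : Int) - r [ZMOD (N : Int)] := by
        have h0 : ((N : Int)) ≡ 0 [ZMOD (N : Int)] := Int.modEq_zero_iff_dvd.mpr dvd_rfl
        simpa [sub_eq_add_neg] using (Int.ModEq.add_right (-r) h0).symm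
      have : (pvTally N shift : Int) ≡ (N : Int) - r [ZMOD (N : Int)] := ((e1.trans e3).trans e4)
      simpa [hk, show (((N : Int) - r).toNat : Int) = (N : Int) - r by omega] using this
    have hmodN : pvTally N shift ≡ k [MOD N] := Int.natCast_modEq_iff.mp hmod
    rw [← List.rotate_mod, hNdef] at *
    rw [show pvTally N shift % cs.length = k % cs.length from hmodN, List.rotate_mod]
    exact List.rotate_eq_drop_append_take hkN

-- ===== VERDICT (by name: the statement is the Claim_ definition above) =====
theorem stringShift_spec : Claim_equal_stringShift := by
  intro s shift _ hpre
  unfold Spec_stringShift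
  exact pvMain s shift hpre
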